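-- pv_equiv track=rewrite | github.com/jonnyisenberg69/trading_bot_system | api/services/websocket_manager.py | _deduplicate_positions
-- ===== SOURCE A (Python) =====
-- from typing import Dict, List, Set, Tuple
--
-- def _deduplicate_positions(positions: List[Dict]) -> List[Dict]:
--     """Deduplicate positions by combining those with the same exchange and symbol."""
--     position_map = {}
--
--     for pos in positions:
--         key = f"{pos.get('exchange')}_{pos.get('symbol')}"
--         if key not in position_map:
--             position_map[key] = pos
--         # If duplicate, keep the most recent one
--         elif pos.get('timestamp', '') > position_map[key].get('timestamp', ''):
--             position_map[key] = pos
--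
--     return list(position_map.values())
-- ===== SOURCE B (Python) =====
-- def _deduplicate_positions(positions):
--     """Deduplicate positions by combining those with the same exchange and symbol."""
--     groups = {}
--     for pos in positions:
--         groups.setdefault(f"{pos.get('exchange')}_{pos.get('symbol')}", []).append(pos)
--     return [max(group, key=lambda p: p.get('timestamp', '')) for group in groups.values()]
-- ===== Notes on version B (the rewrite author's own statement) =====
-- stated objective: alternative
-- what changed: A keeps a single running winner per exchange_symbol key, compare-and-replacing inside one loop; B decomposes into two passes: first group all positions by key into an insertion-ordered dict of lists, then select each group's first timestamp-maximal element with max().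
import Mathlib
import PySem

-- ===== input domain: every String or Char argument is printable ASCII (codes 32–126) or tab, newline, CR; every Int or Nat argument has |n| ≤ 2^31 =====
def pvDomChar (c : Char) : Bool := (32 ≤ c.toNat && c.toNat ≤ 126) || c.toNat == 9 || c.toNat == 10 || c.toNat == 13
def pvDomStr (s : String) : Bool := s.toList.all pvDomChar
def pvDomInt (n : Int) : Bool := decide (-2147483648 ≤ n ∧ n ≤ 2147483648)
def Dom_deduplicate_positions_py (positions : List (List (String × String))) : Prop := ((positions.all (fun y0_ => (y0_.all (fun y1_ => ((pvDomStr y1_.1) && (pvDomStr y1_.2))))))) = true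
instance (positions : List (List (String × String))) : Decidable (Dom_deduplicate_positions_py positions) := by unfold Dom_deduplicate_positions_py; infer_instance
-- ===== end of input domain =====

-- B replaces A's compare-and-replace fold by a two-pass decomposition: group positions by
-- exchange_symbol key, then pick each group's first timestamp-maximal element (objective: alternative).

-- ===== PORT A =====
-- pos.get(k) on the position dict (assoc list, first match)
def pvGet (pos : List (String × String)) (k : String) : Option String :=
  (PySem.Dict.mk pos).get? k

-- f"{x}" for an Optional[str]: None prints as "None"
def pvFmt (o : Option String) : String := o.getD "None"

-- key = f"{pos.get('exchange')}_{pos.get('symbol')}"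
def pvKey (pos : List (String × String)) : String :=
  pvFmt (pvGet pos "exchange") ++ "_" ++ pvFmt (pvGet pos "symbol")

-- pos.get('timestamp', '')
def pvTs (pos : List (String × String)) : String :=
  (PySem.Dict.mk pos).getD "timestamp" ""

-- one iteration of A's loop body
def pvStepA (m : PySem.Dict String (List (String × String))) (pos : List (String × String)) :
    PySem.Dict String (List (String × String)) :=
  let key := pvKey pos
  match m.get? key with
  | none => m.insert key pos
  | some cur => if pvTs cur < pvTs pos then m.insert key pos else m

def deduplicate_positions_py (positions : List (List (String × String))) : List (List (String × String)) :=
  (positions.foldl pvStepA PySem.Dict.empty).values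

-- ===== PORT B =====
-- groups.setdefault(key, []).append(pos)
def pvStepB (g : PySem.Dict String (List (List (String × String)))) (pos : List (String × String)) :
    PySem.Dict String (List (List (String × String))) :=
  g.modify (pvKey pos) [] (· ++ [pos])

def deduplicate_positions_py_alt (positions : List (List (String × String))) : List (List (String × String)) :=
  ((positions.foldl pvStepB PySem.Dict.empty).values).filterMap
    (fun group => PySem.List.max? group pvTs)

-- ===== PRECONDITION & SPEC =====
def Spec_deduplicate_positions_py (positions : List (List (String × String))) (out : List (List (String × String))) : Prop := out = deduplicate_positions_py_alt positions
instance (positions : List (List (String × String))) (out : List (List (String × String))) : Decidable (Spec_deduplicate_positions_py positions out) := by unfold Spec_deduplicate_positions_py; infer_instance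

-- ===== CLAIM (what is proved, stated in full; the proofs are below) =====
def Claim_equal_deduplicate_positions_py : Prop := ∀ (positions : List (List (String × String))), Dom_deduplicate_positions_py positions → Spec_deduplicate_positions_py positions (deduplicate_positions_py positions)

-- ===== LEMMAS AND PROOFS =====

-- projections used by the invariant
def pvF (p : String × List (String × String)) : String × Option (List (String × String)) :=
  (p.1, some p.2)
def pvG (p : String × List (List (String × String))) : String × Option (List (String × String)) :=
  (p.1, PySem.List.max? p.2 pvTs)

-- invariant relating A's running dict to B's group dict
def pvInv (m : PySem.Dict String (List (String × String)))
    (g : PySem.Dict String (List (List (String × String)))) : Prop :=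
  m.items.map pvF = g.items.map pvG ∧ (g.items.map (·.1)).Nodup

theorem pv_max_append_some {xs : List (List (String × String))} (x m : List (String × String))
    (h : PySem.List.max? xs pvTs = some m) :
    PySem.List.max? (xs ++ [x]) pvTs = if pvTs m < pvTs x then some x else some m := by
  simp only [PySem.List.max?] at h ⊢
  rw [List.foldl_append, h]
  rfl

theorem pv_keys_eq {m : PySem.Dict String (List (String × String))}
    {g : PySem.Dict String (List (List (String × String)))}
    (h : m.items.map pvF = g.items.map pvG) :
    m.items.map (·.1) = g.items.map (·.1) := by
  have := congrArg (List.map Prod.fst) h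
  simpa [List.map_map, pvF, pvG, Function.comp] using this

theorem pv_contains_eq {m : PySem.Dict String (List (String × String))}
    {g : PySem.Dict String (List (List (String × String)))}
    (h : m.items.map pvF = g.items.map pvG) (k : String) :
    m.contains k = g.contains k := by
  have hk := pv_keys_eq h
  simp only [PySem.Dict.contains]
  have e1 : (m.items.any fun p => p.1 == k) = (m.items.map (·.1)).any (· == k) := by
    rw [List.any_map]; rfl
  have e2 : (g.items.any fun p => p.1 == k) = (g.items.map (·.1)).any (· == k) := by
    rw [List.any_map]; rfl
  rw [e1, e2, hk]

theorem pv_find_rel {l1 : List (String × List (String × String))}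
    {l2 : List (String × List (List (String × String)))}
    (h : l1.map pvF = l2.map pvG) (k : String) :
    (l1.find? (fun p => p.1 == k)).map pvF = (l2.find? (fun p => p.1 == k)).map pvG := by
  induction l1 generalizing l2 with
  | nil => cases l2 with
    | nil => rfl
    | cons b t2 => simp at h
  | cons a t1 ih =>
    cases l2 with
    | nil => simp at h
    | cons b t2 =>
      simp only [List.map_cons, List.cons.injEq] at h
      obtain ⟨hab, ht⟩ := h
      have hk1 : a.1 = b.1 := congrArg Prod.fst hab
      by_cases hc : (a.1 == k) = true
      · have hc2 : (b.1 == k) = true := by rw [← hk1]; exact hc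
        simp only [List.find?]
        rw [hc, hc2]
        simp [hab]
      · rw [Bool.not_eq_true] at hc
        have hc2 : (b.1 == k) = false := by rw [← hk1]; exact hc
        simp only [List.find?]
        rw [hc, hc2]
        exact ih ht

theorem pv_get_rel {m : PySem.Dict String (List (String × String))}
    {g : PySem.Dict String (List (List (String × String)))}
    (h : m.items.map pvF = g.items.map pvG) (k : String) :
    (m.get? k).map some = (g.get? k).map (fun grp => PySem.List.max? grp pvTs) := by
  have h' := pv_find_rel h k
  simp only [PySem.Dict.get?]
  cases hm : m.items.find? (fun p => p.1 == k) with
  | none =>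
    cases hg : g.items.find? (fun p => p.1 == k) with
    | none => simp
    | some b => rw [hm, hg] at h'; simp [pvG] at h'
  | some a =>
    cases hg : g.items.find? (fun p => p.1 == k) with
    | none => rw [hm, hg] at h'; simp [pvF] at h'
    | some b =>
      rw [hm, hg] at h'
      simp only [Option.map_some] at h' ⊢
      simpa [pvF, pvG] using congrArg Prod.snd (Option.some.inj h')

-- nodup keys: the first match is the only match
theorem pv_find_of_mem {l : List (String × List (List (String × String)))}
    (hn : (l.map (·.1)).Nodup) {b : String × List (List (String × String))} (hb : b ∈ l) :
    l.find? (fun p => p.1 == b.1) = some b := by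
  induction l with
  | nil => simp at hb
  | cons a t ih =>
    simp only [List.map_cons, List.nodup_cons] at hn
    by_cases hc : (a.1 == b.1) = true
    · have hab : a = b := by
        rcases List.mem_cons.mp hb with h | h
        · exact h.symm
        · exact absurd (List.mem_map.mpr ⟨b, h, (eq_of_beq hc).symm⟩) hn.1
      simp only [List.find?]
      rw [hc, hab]
    · rw [Bool.not_eq_true] at hc
      have hb' : b ∈ t := by
        rcases List.mem_cons.mp hb with h | h
        · subst h; simp at hc
        · exact h
      simp only [List.find?]
      rw [hc]
      exact ih hn.2 hb'

-- generic paired map congruence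
theorem pv_map_congr {α β γ : Type} {l1 : List α} {l2 : List β}
    {F F' : α → γ} {G G' : β → γ}
    (h : l1.map F = l2.map G)
    (hstep : ∀ a ∈ l1, ∀ b ∈ l2, F a = G b → F' a = G' b) :
    l1.map F' = l2.map G' := by
  induction l1 generalizing l2 with
  | nil => cases l2 with
    | nil => rfl
    | cons b t2 => simp at h
  | cons a t1 ih =>
    cases l2 with
    | nil => simp at h
    | cons b t2 =>
      simp only [List.map_cons, List.cons.injEq] at h ⊢
      exact ⟨hstep a (by simp) b (by simp) h.1,
        ih h.2 (fun x hx y hy hxy => hstep x (by simp [hx]) y (by simp [hy]) hxy)⟩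

theorem pv_step_pres {m : PySem.Dict String (List (String × String))}
    {g : PySem.Dict String (List (List (String × String)))}
    (h : pvInv m g) (pos : List (String × String)) :
    pvInv (pvStepA m pos) (pvStepB g pos) := by
  obtain ⟨hmap, hnd⟩ := h
  set k := pvKey pos with hkdef
  have hcont := pv_contains_eq hmap k
  have hget := pv_get_rel hmap k
  by_cases hc : g.contains k = true
  · -- key already present: A compares timestamps, B appends to the group
    obtain ⟨b, hb, hbk⟩ : ∃ p ∈ g.items, (p.1 == k) = true := by
      simpa [PySem.Dict.contains, List.any_eq_true] using hc
    have hgget : g.get? k = some b.2 := by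
      simp only [PySem.Dict.get?]
      rw [show (fun (p : String × List (List (String × String))) => p.1 == k)
          = (fun p => p.1 == b.1) from by funext p; rw [eq_of_beq hbk]]
      simp [pv_find_of_mem hnd hb]
    obtain ⟨cur, hmget, hmax⟩ : ∃ cur, m.get? k = some cur ∧ PySem.List.max? b.2 pvTs = some cur := by
      rw [hgget] at hget
      cases hmg : m.get? k with
      | none => rw [hmg] at hget; simp at hget
      | some c => rw [hmg] at hget; simp at hget; exact ⟨c, rfl, hget.symm⟩
    have hmc : m.contains k = true := hcont.trans hc
    have hB : pvStepB g pos = PySem.Dict.mk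
        (g.items.map (fun p => if p.1 == k then (k, b.2 ++ [pos]) else p)) := by
      simp [pvStepB, PySem.Dict.modify, PySem.Dict.insert, PySem.Dict.getD, hgget, hc, ← hkdef]
    have hkeysB : ((pvStepB g pos).items.map (·.1)).Nodup := by
      rw [hB]
      have : (g.items.map (fun p => if p.1 == k then (k, b.2 ++ [pos]) else p)).map (·.1)
          = g.items.map (·.1) := by
        rw [List.map_map]
        apply List.map_congr_left
        intro p _
        by_cases hp : (p.1 == k) = true
        · simp [eq_of_beq hp]
        · simp only [Function.comp_apply]
          rw [if_neg hp]
      rw [this]; exact hnd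
    -- uniqueness: any item of g with key k is b
    have huniq : ∀ p ∈ g.items, (p.1 == k) = true → p = b := by
      intro p hp hpk
      have h1 := pv_find_of_mem hnd hp
      have h2 : g.items.find? (fun q => q.1 == p.1) = some b := by
        rw [show (fun (q : String × List (List (String × String))) => q.1 == p.1)
            = (fun q => q.1 == b.1) from by funext q; rw [eq_of_beq hpk, eq_of_beq hbk]]
        exact pv_find_of_mem hnd hb
      exact Option.some.inj (h1.symm.trans h2)
    have hmaxapp : PySem.List.max? (b.2 ++ [pos]) pvTs =
        if pvTs cur < pvTs pos then some pos else some cur := pv_max_append_some pos cur hmax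
    have hGrepl : ∀ b' ∈ g.items, (b'.1 == k) = true →
        pvG ((fun p => if p.1 == k then (k, b.2 ++ [pos]) else p) b')
          = (k, if pvTs cur < pvTs pos then some pos else some cur) := by
      intro b' _ hp
      simp only [hp, if_true, pvG, hmaxapp]
    by_cases hlt : pvTs cur < pvTs pos
    · -- replace in both
      have hA : pvStepA m pos = PySem.Dict.mk
          (m.items.map (fun p => if p.1 == k then (k, pos) else p)) := by
        simp [pvStepA, hmget, hlt, PySem.Dict.insert, hmc, ← hkdef]
      refine ⟨?_, hkeysB⟩
      rw [hA, hB]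
      show (m.items.map _).map pvF = (g.items.map _).map pvG
      rw [List.map_map, List.map_map]
      apply pv_map_congr hmap
      intro a _ b' hb' hab
      have hk1 : a.1 = b'.1 := congrArg Prod.fst hab
      by_cases hp : (a.1 == k) = true
      · have hp2 : (b'.1 == k) = true := by rw [← hk1]; exact hp
        have e2 := hGrepl b' hb' hp2
        rw [if_pos hlt] at e2
        simp only [Function.comp_apply, hp, if_true, e2]
        simp [pvF]
      · have hp2 : (b'.1 == k) = false := by rw [← hk1]; simpa using hp
        simp only [Function.comp_apply, hp, hp2, Bool.false_eq_true, if_false]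
        exact hab
    · -- keep in A; B still appends, but the group maximum is unchanged
      have hA : pvStepA m pos = m := by
        simp [pvStepA, hmget, hlt, ← hkdef]
      refine ⟨?_, hkeysB⟩
      rw [hA, hB]
      show m.items.map pvF = (g.items.map _).map pvG
      rw [List.map_map]
      apply pv_map_congr hmap
      intro a _ b' hb' hab
      have hk1 : a.1 = b'.1 := congrArg Prod.fst hab
      by_cases hp : (b'.1 == k) = true
      · have e2 := hGrepl b' hb' hp
        rw [if_neg hlt] at e2
        rw [Function.comp_apply, e2]
        have hb'b := huniq b' hb' hp
        have e3 : pvG b' = (k, some cur) := by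
          rw [hb'b]
          simp only [pvG, hmax]
          rw [eq_of_beq hbk]
        rw [hab, e3]
      · rw [Bool.not_eq_true] at hp
        simp only [Function.comp_apply, hp, Bool.false_eq_true, if_false]
        exact hab
  · -- fresh key: both append
    have hcf : g.contains k = false := by simpa using hc
    have hmcf : m.contains k = false := hcont.trans hcf
    simp only [PySem.Dict.contains] at hmcf
    have hgcf := hcf
    simp only [PySem.Dict.contains] at hgcf
    have hmget : m.get? k = none := by
      simp only [PySem.Dict.get?]
      rw [List.find?_eq_none.mpr (fun p hp => List.any_eq_false.mp hmcf p hp)]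
      rfl
    have hgget : g.get? k = none := by
      simp only [PySem.Dict.get?]
      rw [List.find?_eq_none.mpr (fun p hp => List.any_eq_false.mp hgcf p hp)]
      rfl
    have hA : pvStepA m pos = PySem.Dict.mk (m.items ++ [(k, pos)]) := by
      simp [pvStepA, hmget, PySem.Dict.insert, PySem.Dict.contains, hmcf, ← hkdef]
    have hB : pvStepB g pos = PySem.Dict.mk (g.items ++ [(k, [pos])]) := by
      simp [pvStepB, PySem.Dict.modify, PySem.Dict.insert, PySem.Dict.getD,
        PySem.Dict.contains, hgget, hgcf, ← hkdef]
    constructor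
    · rw [hA, hB]
      show (m.items ++ [(k, pos)]).map pvF = (g.items ++ [(k, [pos])]).map pvG
      rw [List.map_append, List.map_append, hmap]
      simp only [List.map_cons, List.map_nil]
      rfl
    · rw [hB]
      show ((g.items ++ [(k, [pos])]).map (·.1)).Nodup
      rw [List.map_append]
      refine List.Nodup.append hnd (by simp) ?_
      intro x hx hx'
      simp at hx'
      subst hx'
      have : g.items.any (fun p => p.1 == k) = true := by
        rw [List.any_eq_true]
        obtain ⟨p, hp, hpk⟩ := List.mem_map.mp hx
        exact ⟨p, hp, by simp [hpk]⟩
      rw [this] at hgcf; exact absurd hgcf (by simp)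

theorem pv_fold_pres (l : List (List (String × String)))
    {m : PySem.Dict String (List (String × String))}
    {g : PySem.Dict String (List (List (String × String)))}
    (h : pvInv m g) :
    pvInv (l.foldl pvStepA m) (l.foldl pvStepB g) := by
  induction l generalizing m g with
  | nil => exact h
  | cons x t ih => exact ih (pv_step_pres h x)

theorem pv_values_rel {l1 : List (String × List (String × String))}
    {l2 : List (String × List (List (String × String)))}
    (h : l1.map pvF = l2.map pvG) :
    l1.map (·.2) = (l2.map (·.2)).filterMap (fun grp => PySem.List.max? grp pvTs) := by
  induction l1 generalizing l2 with
  | nil => cases l2 with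
    | nil => rfl
    | cons b t2 => simp at h
  | cons a t1 ih =>
    cases l2 with
    | nil => simp at h
    | cons b t2 =>
      simp only [List.map_cons, List.cons.injEq] at h
      have h2 : PySem.List.max? b.2 pvTs = some a.2 := by
        have := congrArg Prod.snd h.1
        simpa [pvF, pvG] using this.symm
      simp [h2, ih h.2]

-- ===== VERDICT (by name: the statement is the Claim_ definition above) =====
theorem deduplicate_positions_py_spec : Claim_equal_deduplicate_positions_py := by
  intro positions _
  show deduplicate_positions_py positions = deduplicate_positions_py_alt positions
  have h := pv_fold_pres positions (m := PySem.Dict.empty) (g := PySem.Dict.empty)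
    ⟨rfl, by simp [PySem.Dict.empty]⟩
  simpa [deduplicate_positions_py, deduplicate_positions_py_alt, PySem.Dict.values]
    using pv_values_rel h.1
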